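-- pv_equiv track=rewrite | github.com/lsst/rubin_sim | rubin_sim/utils/htm_module.py | level_from_htmid
-- ===== SOURCE A (Python) =====
-- def level_from_htmid(htmid):
--     """
--     Find the level of a trixel from its htmid.  The level
--     indicates how refined the triangular mesh is.
--
--     There are 8*4**(d-1) triangles in a mesh of level=d
--
--     (equation 2.5 of
--     Szalay A. et al. (2007)
--     "Indexing the Sphere with the Hierarchical Triangular Mesh"
--     arXiv:cs/0701164)
--
--     Note: valid htmids have 4+2n bits with a leading bit of 1
--     """
--     htmid_copy = htmid
--     i_level = 1
--     while htmid_copy > 15: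
--         htmid_copy >>= 2
--         i_level += 1
--
--     if htmid_copy < 8:
--         raise RuntimeError(
--             "\n%d is not a valid htmid.\n" % htmid
--             + "Valid htmids will have 4+2n bits\n"
--             + "with a leading bit of 1\n"
--         )
--
--     return i_level
-- ===== SOURCE B (Python) =====
-- def level_from_htmid(htmid):
--     """Closed-form level from the bit length: no shift loop."""
--     b = htmid.bit_length()
--     if htmid > 0 and b >= 4 and b % 2 == 0:
--         return b // 2 - 1
--     raise RuntimeError(
--         "\n%d is not a valid htmid.\n" % htmid
--         + "Valid htmids will have 4+2n bits\n"
--         + "with a leading bit of 1\n"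
--     )
-- ===== Notes on version B (the rewrite author's own statement) =====
-- stated objective: simpler
-- what changed: Replaces the shift-by-2 counting loop with a closed form on the bit length: level = bit_length()//2 - 1 when htmid > 0 and bit_length is even and at least 4, raising the identical RuntimeError otherwise.
import Mathlib
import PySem

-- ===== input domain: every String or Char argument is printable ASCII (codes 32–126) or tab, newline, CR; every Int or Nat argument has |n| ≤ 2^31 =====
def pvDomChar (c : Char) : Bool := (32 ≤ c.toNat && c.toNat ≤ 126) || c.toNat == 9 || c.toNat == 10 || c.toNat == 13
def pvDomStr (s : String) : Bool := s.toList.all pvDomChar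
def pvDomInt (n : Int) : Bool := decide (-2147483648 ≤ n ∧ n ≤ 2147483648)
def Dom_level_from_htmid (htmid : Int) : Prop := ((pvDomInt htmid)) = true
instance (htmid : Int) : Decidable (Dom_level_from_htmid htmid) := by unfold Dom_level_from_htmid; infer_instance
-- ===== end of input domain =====

-- B replaces A's shift-by-2 counting loop with a closed form on the bit length (objective: simpler).

-- ===== PORT A =====
-- while htmid_copy > 15: htmid_copy >>= 2; i_level += 1   (>> 2 on a positive int is floor division by 4)
def pvALoop (c : Int) (lvl : Int) : Int × Int :=
  if h : 15 < c then pvALoop (PySem.Int.floordiv c 4) (lvl + 1) else (c, lvl)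
termination_by c.toNat
decreasing_by
  have h4 : PySem.Int.floordiv c 4 = c / 4 := PySem.Int.floordiv_eq_ediv_of_pos (by omega)
  rw [h4]; omega

def level_from_htmid (htmid : Int) : Int :=
  let p := pvALoop htmid 1
  if p.1 < 8 then 0  -- Python raises RuntimeError here; excluded by Pre_
  else p.2

-- ===== PORT B =====
def level_from_htmid_alt (htmid : Int) : Int :=
  let b := PySem.Int.bitLength htmid
  if 0 < htmid ∧ 4 ≤ b ∧ b % 2 = 0 then
    PySem.Int.floordiv (b : Int) 2 - 1
  else 0  -- Python raises RuntimeError here; excluded by Pre_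

-- ===== PRECONDITION & SPEC =====
-- Pre_ excludes exactly the inputs on which A raises RuntimeError ("not a valid htmid"):
-- non-positive htmids and those whose bit length is odd or below 4.  B raises the same error there.
def Pre_level_from_htmid (htmid : Int) : Prop :=
  8 ≤ htmid ∧ PySem.Int.bitLength htmid % 2 = 0
instance (htmid : Int) : Decidable (Pre_level_from_htmid htmid) := by
  unfold Pre_level_from_htmid; infer_instance

def pvWitness_level_from_htmid : Int := 8

def Spec_level_from_htmid (htmid : Int) (out : Int) : Prop := out = level_from_htmid_alt htmid
instance (htmid : Int) (out : Int) : Decidable (Spec_level_from_htmid htmid out) := by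
  unfold Spec_level_from_htmid; infer_instance

-- ===== CLAIM (what is proved, stated in full; the proofs are below) =====
def Claim_equal_level_from_htmid : Prop :=
  ∀ (htmid : Int), Dom_level_from_htmid htmid → Pre_level_from_htmid htmid →
    Spec_level_from_htmid htmid (level_from_htmid htmid)

-- ===== LEMMAS AND PROOFS =====

lemma pv_bitLength_div4 (c : Int) (hc : 4 ≤ c) :
    PySem.Int.bitLength (PySem.Int.floordiv c 4) + 2 = PySem.Int.bitLength c := by
  have h1 : PySem.Int.bitLength c = PySem.Int.bitLength (PySem.Int.floordiv c 2) + 1 :=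
    PySem.Int.bitLength_of_pos (by omega)
  have e2 : PySem.Int.floordiv c 2 = c / 2 := PySem.Int.floordiv_eq_ediv_of_pos (by omega)
  have hc2 : 0 < c / 2 := by omega
  have h2 : PySem.Int.bitLength (PySem.Int.floordiv c 2)
      = PySem.Int.bitLength (PySem.Int.floordiv (PySem.Int.floordiv c 2) 2) + 1 := by
    rw [e2]; exact PySem.Int.bitLength_of_pos hc2
  have e4 : PySem.Int.floordiv (PySem.Int.floordiv c 2) 2 = PySem.Int.floordiv c 4 := by
    rw [e2, PySem.Int.floordiv_eq_ediv_of_pos (b := 2) (by omega),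
        PySem.Int.floordiv_eq_ediv_of_pos (b := 4) (by omega)]
    omega
  rw [h1, h2, e4]

lemma pv_bitLength_lb (c : Int) (hc : 8 ≤ c) : 4 ≤ PySem.Int.bitLength c := by
  have h := PySem.Int.lt_two_pow_bitLength c
  by_contra hlt
  have hb : PySem.Int.bitLength c ≤ 3 := by omega
  have : c.natAbs < 2 ^ 3 := lt_of_lt_of_le h (Nat.pow_le_pow_right (by omega) hb)
  omega

lemma pv_bitLength_ub (c : Int) (hc : 0 < c) (hc15 : c ≤ 15) : PySem.Int.bitLength c ≤ 4 := by
  have h := PySem.Int.two_pow_bitLength_le c (by omega)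
  by_contra hgt
  have hb : 4 ≤ PySem.Int.bitLength c - 1 := by omega
  have : 2 ^ 4 ≤ c.natAbs := le_trans (Nat.pow_le_pow_right (by omega) hb) h
  omega

-- loop invariant: on valid inputs the loop lands in [8,15] and the level is b/2 - 2 above the start
lemma pv_loop_eq (n : Nat) : ∀ (c l : Int), c.toNat = n → 8 ≤ c →
    PySem.Int.bitLength c % 2 = 0 →
    ∃ r : Int, pvALoop c l = (r, l + ((PySem.Int.bitLength c / 2 : Nat) : Int) - 2) ∧ 8 ≤ r := by
  induction n using Nat.strong_induction_on with
  | _ n ih =>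
    intro c l hn hc hb
    by_cases h15 : 15 < c
    · have e4 : PySem.Int.floordiv c 4 = c / 4 := PySem.Int.floordiv_eq_ediv_of_pos (by omega)
      have hbl := pv_bitLength_div4 c (by omega)
      have hc' : 8 ≤ PySem.Int.floordiv c 4 := by
        -- bitLength c even and c ≥ 16 forces bitLength c ≥ 6, hence c ≥ 32
        by_contra hlt
        rw [e4] at hlt
        have hub : PySem.Int.bitLength (PySem.Int.floordiv c 4) ≤ 4 := by
          apply pv_bitLength_ub _ (by rw [e4]; omega)
          rw [e4]; omega
        have hlb : 4 ≤ PySem.Int.bitLength (PySem.Int.floordiv c 4) := by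
          by_contra hx
          have h5 : PySem.Int.bitLength c ≤ 5 := by omega
          have h4 : 4 ≤ PySem.Int.bitLength c := pv_bitLength_lb c hc
          -- bitLength even, between 4 and 5 → = 4 → c ≤ 15, contradiction
          have hbc : PySem.Int.bitLength c = 4 := by omega
          have := PySem.Int.lt_two_pow_bitLength c
          rw [hbc] at this
          omega
        -- so bitLength (c//4) = 4, bitLength c = 6, yet c//4 < 8 means c//4 ≤ 7 hence bitLength ≤ 3
        have habs : (PySem.Int.floordiv c 4).natAbs ≤ 7 := by rw [e4]; omega
        have hpow := PySem.Int.two_pow_bitLength_le (PySem.Int.floordiv c 4) (by rw [e4]; omega)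
        have : 2 ^ 3 ≤ (PySem.Int.floordiv c 4).natAbs :=
          le_trans (Nat.pow_le_pow_right (by omega) (by omega)) hpow
        omega
      have hb' : PySem.Int.bitLength (PySem.Int.floordiv c 4) % 2 = 0 := by omega
      have hdec : (PySem.Int.floordiv c 4).toNat < n := by rw [e4]; omega
      obtain ⟨r, hr, hr8⟩ := ih _ hdec (PySem.Int.floordiv c 4) (l + 1) rfl hc' hb'
      refine ⟨r, ?_, hr8⟩
      rw [pvALoop, dif_pos h15, hr]
      have h4le : 4 ≤ PySem.Int.bitLength (PySem.Int.floordiv c 4) := pv_bitLength_lb _ hc'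
      congr 1
      omega
    · -- c ∈ [8,15]: bitLength c = 4, loop stops, level unchanged
      have hb4 : PySem.Int.bitLength c = 4 := by
        have := pv_bitLength_lb c hc
        have := pv_bitLength_ub c (by omega) (by omega)
        omega
      refine ⟨c, ?_, hc⟩
      rw [pvALoop, dif_neg h15, hb4]
      norm_num

theorem level_from_htmid_spec : Claim_equal_level_from_htmid := by
  intro htmid _ hpre
  obtain ⟨hc, hb⟩ := hpre
  obtain ⟨r, hr, hr8⟩ := pv_loop_eq htmid.toNat htmid 1 rfl hc hb
  have h4 : 4 ≤ PySem.Int.bitLength htmid := pv_bitLength_lb htmid hc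
  unfold Spec_level_from_htmid level_from_htmid level_from_htmid_alt
  rw [hr]
  simp only [if_neg (by omega : ¬ r < 8)]
  rw [if_pos ⟨by omega, h4, hb⟩,
      PySem.Int.floordiv_eq_ediv_of_pos (by omega : (0:Int) < 2)]
  omega
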